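-- pv_equiv track=rewrite | github.com/neoho91/grclab7 | global_fit_trial.py | generate_p
-- ===== SOURCE A (Python) =====
-- def generate_p(ps, var_num, y_num,global_idxs):
--     idxs = list(range(var_num*y_num-len(global_idxs)*(y_num-1)))
--     for i in range(y_num-1):
--         for k,global_idx in enumerate(global_idxs):
--             idxs.insert((i+1)*var_num+(k),global_idx)
--     _n=0
--     for i in range(y_num):
--         curr_ps = []
--         for j in range(var_num):
--             curr_ps.append(ps[idxs[_n]])
--             _n+=1
--         yield curr_ps
-- ===== SOURCE B (Python) =====
-- def generate_p(ps, var_num, y_num, global_idxs):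
--     # One linear pass: the shared (global) values are looked up once, and each
--     # subsequent row is head + the next consecutive slice of fresh parameters.
--     g = len(global_idxs)
--     w = var_num - g
--     head = [ps[gi] for gi in global_idxs] if y_num > 1 else []
--     pos = var_num
--     for i in range(y_num):
--         if i == 0:
--             yield [ps[j] for j in range(var_num)]
--         else:
--             yield head + [ps[pos + j] for j in range(w)]
--             pos += w
-- ===== Notes on version B (the rewrite author's own statement) =====
-- stated objective: alternative
-- what changed: B drops A's index-permutation built with repeated list.insert inside a double loop and instead emits each row directly in one linear pass: the shared global values are looked up once and every later row is that head plus the next consecutive slice of parameters.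
-- outside the precondition, e.g. on generate_p([10, 20], 1, 2, [0, 1]): A returns [[10], [20]], B returns [[10], [10, 20]]
import Mathlib
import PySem

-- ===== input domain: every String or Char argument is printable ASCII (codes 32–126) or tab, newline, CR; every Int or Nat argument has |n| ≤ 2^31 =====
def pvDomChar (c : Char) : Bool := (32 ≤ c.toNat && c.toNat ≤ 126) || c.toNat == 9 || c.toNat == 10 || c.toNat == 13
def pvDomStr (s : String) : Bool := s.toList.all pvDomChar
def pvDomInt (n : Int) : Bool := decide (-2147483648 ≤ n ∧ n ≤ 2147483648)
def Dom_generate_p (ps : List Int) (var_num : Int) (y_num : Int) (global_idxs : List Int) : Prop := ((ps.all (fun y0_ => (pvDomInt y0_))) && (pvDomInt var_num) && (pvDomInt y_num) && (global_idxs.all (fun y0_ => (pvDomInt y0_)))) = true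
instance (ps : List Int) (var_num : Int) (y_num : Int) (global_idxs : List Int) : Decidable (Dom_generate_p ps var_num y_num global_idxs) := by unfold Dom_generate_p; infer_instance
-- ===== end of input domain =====

-- B replaces A's repeated list.insert index shuffling by one linear pass building
-- each row directly (objective: alternative; return value only, no mutation involved).

-- ===== PORT A =====
def generate_p (ps : List Int) (var_num : Int) (y_num : Int) (global_idxs : List Int) : List (List Int) :=
  let idxs0 := PySem.List.pyRange 0 (var_num * y_num - (global_idxs.length : Int) * (y_num - 1)) 1
  let idxs := (PySem.List.pyRange 0 (y_num - 1) 1).foldl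
    (fun idxs i =>
      (PySem.List.enumerate global_idxs 0).foldl
        (fun ac kg => PySem.List.insert ac ((i + 1) * var_num + kg.1) kg.2) idxs)
    idxs0
  let res := (PySem.List.pyRange 0 y_num 1).foldl
    (fun (acc : List (List Int) × Int) _i =>
      let inner := (PySem.List.pyRange 0 var_num 1).foldl
        (fun (st : List Int × Int) _j =>
          (st.1 ++ [PySem.List.pyGetD ps (PySem.List.pyGetD idxs st.2 0) 0], st.2 + 1))
        ([], acc.2)
      (acc.1 ++ [inner.1], inner.2))
    ([], 0)
  res.1

-- ===== PORT B =====
def generate_p_alt (ps : List Int) (var_num : Int) (y_num : Int) (global_idxs : List Int) : List (List Int) :=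
  let w := var_num - (global_idxs.length : Int)
  let head := if 1 < y_num then global_idxs.map (fun gi => PySem.List.pyGetD ps gi 0) else []
  let res := (PySem.List.pyRange 0 y_num 1).foldl
    (fun (acc : List (List Int) × Int) i =>
      if i = 0 then
        (acc.1 ++ [(PySem.List.pyRange 0 var_num 1).map (fun j => PySem.List.pyGetD ps j 0)], acc.2)
      else
        (acc.1 ++ [head ++ (PySem.List.pyRange 0 w 1).map (fun j => PySem.List.pyGetD ps (acc.2 + j) 0)], acc.2 + w))
    ([], var_num)
  res.1

-- ===== PRECONDITION & SPEC =====
-- Pre_ excludes (a) inputs where A raises IndexError (some ps index out of range), and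
-- (b) inputs with len(global_idxs) > var_num and y_num ≥ 2, where A's insert positions
-- fall past the end of the list and clamp-append, an accidental layout of A's insert loop.
def Pre_generate_p (ps : List Int) (var_num : Int) (y_num : Int) (global_idxs : List Int) : Prop :=
  y_num ≤ 0 ∨
    (0 ≤ var_num ∧
      var_num * y_num - (global_idxs.length : Int) * (y_num - 1) ≤ (ps.length : Int) ∧
      (2 ≤ y_num →
        (global_idxs.length : Int) ≤ var_num ∧
        ∀ gi ∈ global_idxs, -(ps.length : Int) ≤ gi ∧ gi < (ps.length : Int)))
instance (ps : List Int) (var_num : Int) (y_num : Int) (global_idxs : List Int) : Decidable (Pre_generate_p ps var_num y_num global_idxs) := by unfold Pre_generate_p; infer_instance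

def pvWitness_generate_p : List Int × Int × Int × List Int := ([10, 20, 30, 40, 50], 3, 2, [1])

def Spec_generate_p (ps : List Int) (var_num : Int) (y_num : Int) (global_idxs : List Int) (out : List (List Int)) : Prop := out = generate_p_alt ps var_num y_num global_idxs
instance (ps : List Int) (var_num : Int) (y_num : Int) (global_idxs : List Int) (out : List (List Int)) : Decidable (Spec_generate_p ps var_num y_num global_idxs out) := by unfold Spec_generate_p; infer_instance

-- ===== CLAIM (what is proved, stated in full; the proofs are below) =====
def Claim_equal_generate_p : Prop := ∀ (ps : List Int) (var_num : Int) (y_num : Int) (global_idxs : List Int), Dom_generate_p ps var_num y_num global_idxs → Pre_generate_p ps var_num y_num global_idxs → Spec_generate_p ps var_num y_num global_idxs (generate_p ps var_num y_num global_idxs)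

-- ===== LEMMAS AND PROOFS =====

theorem pv_ins_run (gs : List Int) : ∀ (l : List Int) (b s : Int) (p : Nat),
    b + s = (p : Int) → p ≤ l.length →
    (PySem.List.enumerate gs s).foldl
      (fun ac kg => PySem.List.insert ac (b + kg.1) kg.2) l
    = l.take p ++ gs ++ l.drop p := by
  induction gs with
  | nil => intro l b s p h hp; simp [PySem.List.enumerate_nil]
  | cons x gs ih =>
    intro l b s p h hp
    rw [PySem.List.enumerate_cons, List.foldl_cons]
    have h1 : b + s = (p : Int) := h
    have : PySem.List.insert l (b + s) x = l.take p ++ x :: l.drop p := by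
      rw [h1, PySem.List.insert_natCast l p x hp]
    rw [this]
    rw [ih (l.take p ++ x :: l.drop p) b (s+1) (p+1) (by push_cast; omega)
        (by simp; omega)]
    have htake : (l.take p ++ x :: l.drop p).take (p+1) = l.take p ++ [x] := by
      rw [List.take_append]
      simp [List.length_take, hp]
    have hdrop : (l.take p ++ x :: l.drop p).drop (p+1) = l.drop p := by
      rw [List.drop_append]
      simp [List.length_take, hp]
    rw [htake, hdrop]
    simp

def pvSeg (v w : Int) (i : Nat) : List Int := PySem.List.pyRange (v + i*w) (v + i*w + w) 1

def pvPref (v w : Int) (gs : List Int) (t : Nat) : List Int :=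
  PySem.List.pyRange 0 v 1 ++ (List.range t).flatMap (fun i => gs ++ pvSeg v w i)

theorem pvPref_length (v w : Int) (gs : List Int) (hv : 0 ≤ v) (hw : 0 ≤ w)
    (hvw : v = (gs.length : Int) + w) (t : Nat) :
    ((pvPref v w gs t).length : Int) = ((t : Int) + 1) * v := by
  simp [pvPref, pvSeg, PySem.List.length_pyRange_one, List.length_flatMap]
  rw [max_eq_left hv, max_eq_left hw]
  nlinarith

theorem pv_idxs (v : Int) (gs : List Int) (hv : 0 ≤ v) (hg : (gs.length : Int) ≤ v) (m : Nat) :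
    (PySem.List.pyRange 0 (m : Int) 1).foldl
      (fun idxs i => (PySem.List.enumerate gs 0).foldl
        (fun ac kg => PySem.List.insert ac ((i+1)*v + kg.1) kg.2) idxs)
      (PySem.List.pyRange 0 (v + m*(v - (gs.length : Int))) 1)
    = pvPref v (v - (gs.length : Int)) gs m := by
  set w := v - (gs.length : Int) with hwdef
  have hw : 0 ≤ w := by omega
  have hvw : v = (gs.length : Int) + w := by omega
  have key : ∀ t : Nat, t ≤ m →
      (PySem.List.pyRange 0 (t : Int) 1).foldl
        (fun idxs i => (PySem.List.enumerate gs 0).foldl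
          (fun ac kg => PySem.List.insert ac ((i+1)*v + kg.1) kg.2) idxs)
        (PySem.List.pyRange 0 (v + m*w) 1)
      = pvPref v w gs t ++ PySem.List.pyRange (v + t*w) (v + m*w) 1 := by
    intro t
    induction t with
    | zero =>
      intro _
      have h0 : PySem.List.pyRange ((0:Int)) (((0:Nat)):Int) 1 = [] := by
        rw [PySem.List.pyRange_one_eq_nil]; simp
      rw [h0, List.foldl_nil, pvPref]
      simp only [List.range_zero, List.flatMap_nil, List.append_nil, Nat.cast_zero,
        zero_mul, add_zero]
      rw [← PySem.List.pyRange_one_append 0 v (v + m*w) hv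
        (by nlinarith [Int.natCast_nonneg m])]
    | succ t ih =>
      intro ht
      have htm : t ≤ m := Nat.le_of_succ_le ht
      have hcast : ((t + 1 : Nat) : Int) = (t : Int) + 1 := by push_cast; ring
      rw [hcast, PySem.List.pyRange_one_succ_right (by positivity), List.foldl_append,
        ih htm, List.foldl_cons, List.foldl_nil]
      -- one insert-run at position ((t:Int)+1)*v
      have hlen := pvPref_length v w gs hv hw hvw t
      have hp : ((t + 1) * v.toNat : Int) = ((t : Int) + 1) * v := by
        push_cast [Int.toNat_of_nonneg hv]; ring
      have hplen : (t + 1) * v.toNat = (pvPref v w gs t).length := by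
        have h2 : (((t + 1) * v.toNat : Nat) : Int) = ((pvPref v w gs t).length : Int) := by
          push_cast
          rw [hp, ← hlen]
        exact_mod_cast h2
      rw [pv_ins_run gs _ (((t : Int) + 1) * v) 0 ((t + 1) * v.toNat)
        (by push_cast [Int.toNat_of_nonneg hv]; ring)
        (by rw [List.length_append, ← hplen]; exact Nat.le_add_right _ _)]
      rw [hplen, List.take_left, List.drop_left]
      have hc : v + ((t+1 : Nat) : Int)*w = v + t*w + w := by push_cast; ring
      have htm' : ((t : Int) + 1) ≤ (m : Int) := by exact_mod_cast ht
      have hsplit : PySem.List.pyRange (v + t*w) (v + m*w) 1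
          = pvSeg v w t ++ PySem.List.pyRange (v + ((t+1 : Nat) : Int)*w) (v + m*w) 1 := by
        rw [hc, pvSeg]
        exact PySem.List.pyRange_one_append _ _ _ (by omega) (by nlinarith)
      rw [hsplit]
      rw [pvPref, pvPref, List.range_succ, List.flatMap_append]
      simp
  have h2 := key m le_rfl
  rw [PySem.List.pyRange_one_eq_nil le_rfl, List.append_nil] at h2
  exact h2

theorem pv_read_fold {γ : Type} (F : Int → Int) : ∀ (xs : List γ) (r0 : List Int) (n : Int),
    xs.foldl (fun (st : List Int × Int) _ => (st.1 ++ [F st.2], st.2 + 1)) (r0, n)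
    = (r0 ++ (List.range xs.length).map (fun (j : Nat) => F (n + (j : Int))), n + (xs.length : Int)) := by
  intro xs
  induction xs with
  | nil => intro r0 n; simp
  | cons x xs ih =>
    intro r0 n
    rw [List.foldl_cons, ih]
    refine Prod.ext ?_ (by simp; ring)
    simp [List.range_succ_eq_map, List.map_map]
    intro a _
    congr 1
    ring

theorem pv_read_outer {β : Type} (F : Int → Int) (v : Int) :
    ∀ (ys : List β) (acc : List (List Int)) (n : Int),
    ys.foldl (fun (a : List (List Int) × Int) _ =>
        (a.1 ++ [((PySem.List.pyRange 0 v 1).foldl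
            (fun (st : List Int × Int) _ => (st.1 ++ [F st.2], st.2 + 1)) ([], a.2)).1],
          ((PySem.List.pyRange 0 v 1).foldl
            (fun (st : List Int × Int) _ => (st.1 ++ [F st.2], st.2 + 1)) ([], a.2)).2))
      (acc, n)
    = (acc ++ (List.range ys.length).map (fun (r : Nat) =>
          (List.range v.toNat).map (fun (j : Nat) => F (n + (r : Int) * v.toNat + (j : Int)))),
        n + (ys.length : Int) * v.toNat) := by
  intro ys
  induction ys with
  | nil => intro acc n; simp
  | cons y ys ih =>
    intro acc n
    have hlen : (PySem.List.pyRange 0 v 1).length = v.toNat := by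
      rw [PySem.List.length_pyRange_one]; norm_num
    rw [List.foldl_cons, pv_read_fold, hlen, ih]
    refine Prod.ext ?_ (by simp; ring)
    simp [List.range_succ_eq_map, List.map_map]
    intro a _ b _
    congr 1
    ring

theorem pv_getD_append (pre xs : List Int) (k : Nat) (d : Int) :
    (pre ++ xs).getD (pre.length + k) d = xs.getD k d := by
  simp [List.getD, List.getElem?_append_right (Nat.le_add_right pre.length k)]

theorem pv_map_getD_range (G : Int → Int) : ∀ (l : List Int),
    (List.range l.length).map (fun (j : Nat) => G (l.getD j 0)) = l.map G := by
  intro l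
  induction l with
  | nil => simp
  | cons x l ih =>
    simp [List.range_succ_eq_map, List.map_map]
    exact ih

theorem pv_chunk_rows_pre (G : Int → Int) (v' : Nat) :
    ∀ (chunks : List (List Int)) (_ : ∀ c ∈ chunks, c.length = v') (pre : List Int),
    (List.range chunks.length).map (fun (r : Nat) =>
        (List.range v').map (fun (j : Nat) =>
          G ((pre ++ chunks.flatten).getD (pre.length + r * v' + j) 0)))
    = chunks.map (fun c => c.map G) := by
  intro chunks
  induction chunks with
  | nil => intro _ pre; simp
  | cons c cs ih =>
    intro h pre
    have hc : c.length = v' := h c (by simp)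
    have hcs : ∀ c' ∈ cs, c'.length = v' := fun c' hm => h c' (by simp [hm])
    simp only [List.length_cons, List.range_succ_eq_map, List.map_cons, List.map_map]
    congr 1
    · -- head row
      rw [← hc, ← pv_map_getD_range G c]
      apply List.map_congr_left
      intro j hj
      simp only [Nat.zero_mul, Nat.add_zero]
      have h1 : (pre ++ (c ++ cs.flatten)).getD (pre.length + j) 0
          = (c ++ cs.flatten).getD j 0 := pv_getD_append _ _ _ _
      rw [List.flatten_cons, h1, List.getD,
        List.getElem?_append_left (List.mem_range.mp hj)]
      simp [List.getD]
    · -- tail rows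
      rw [← ih hcs (pre ++ c)]
      apply List.map_congr_left
      intro r _
      simp only [Function.comp_apply]
      apply List.map_congr_left
      intro j _
      congr 2
      · rw [List.flatten_cons, ← List.append_assoc]
      · simp [hc, Nat.succ_mul]
        ring

theorem pv_chunk_rows (G : Int → Int) (v' : Nat) (chunks : List (List Int))
    (h : ∀ c ∈ chunks, c.length = v') :
    (List.range chunks.length).map (fun (r : Nat) =>
        (List.range v').map (fun (j : Nat) => G ((chunks.flatten).getD (r * v' + j) 0)))
    = chunks.map (fun c => c.map G) := by
  have := pv_chunk_rows_pre G v' chunks h []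
  simpa using this

theorem pv_b_tail (G : Int → Int) (head RZ : List Int) (w : Int) :
    ∀ (xs : List Int) (_ : ∀ x ∈ xs, ¬ x = 0) (acc : List (List Int)) (pos : Int),
    xs.foldl (fun (a : List (List Int) × Int) i =>
        if i = 0 then (a.1 ++ [RZ], a.2)
        else (a.1 ++ [head ++ (PySem.List.pyRange 0 w 1).map (fun j => G (a.2 + j))], a.2 + w))
      (acc, pos)
    = (acc ++ (List.range xs.length).map (fun (i : Nat) =>
          head ++ (PySem.List.pyRange 0 w 1).map (fun j => G (pos + (i : Int) * w + j))),
        pos + (xs.length : Int) * w) := by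
  intro xs
  induction xs with
  | nil => intro _ acc pos; simp
  | cons x xs ih =>
    intro hx acc pos
    rw [List.foldl_cons, if_neg (hx x (by simp))]
    rw [ih (fun x' hm => hx x' (by simp [hm])) _ _]
    refine Prod.ext ?_ (by simp; ring)
    simp [List.range_succ_eq_map, List.map_map]
    intro a _ b _ _
    congr 1
    ring

theorem pv_read_outerA (ps idxs : List Int) (v : Int) {β : Type} (ys : List β)
    (acc : List (List Int)) (n : Int) :
    ys.foldl (fun (a : List (List Int) × Int) _ =>
        (a.1 ++ [((PySem.List.pyRange 0 v 1).foldl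
            (fun (st : List Int × Int) _ =>
              (st.1 ++ [PySem.List.pyGetD ps (PySem.List.pyGetD idxs st.2 0) 0], st.2 + 1))
            ([], a.2)).1],
          ((PySem.List.pyRange 0 v 1).foldl
            (fun (st : List Int × Int) _ =>
              (st.1 ++ [PySem.List.pyGetD ps (PySem.List.pyGetD idxs st.2 0) 0], st.2 + 1))
            ([], a.2)).2))
      (acc, n)
    = (acc ++ (List.range ys.length).map (fun (r : Nat) =>
          (List.range v.toNat).map (fun (j : Nat) =>
            PySem.List.pyGetD ps (PySem.List.pyGetD idxs (n + (r : Int) * v.toNat + (j : Int)) 0) 0)),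
        n + (ys.length : Int) * v.toNat) :=
  pv_read_outer (fun k => PySem.List.pyGetD ps (PySem.List.pyGetD idxs k 0) 0) v ys acc n

theorem pv_b_tailA (ps : List Int) (head RZ : List Int) (w : Int) (xs : List Int)
    (hx : ∀ x ∈ xs, ¬ x = 0) (acc : List (List Int)) (pos : Int) :
    xs.foldl (fun (a : List (List Int) × Int) i =>
        if i = 0 then (a.1 ++ [RZ], a.2)
        else (a.1 ++ [head ++ (PySem.List.pyRange 0 w 1).map
              (fun j => PySem.List.pyGetD ps (a.2 + j) 0)], a.2 + w))
      (acc, pos)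
    = (acc ++ (List.range xs.length).map (fun (i : Nat) =>
          head ++ (PySem.List.pyRange 0 w 1).map
            (fun j => PySem.List.pyGetD ps (pos + (i : Int) * w + j) 0)),
        pos + (xs.length : Int) * w) :=
  pv_b_tail (fun x => PySem.List.pyGetD ps x 0) head RZ w xs hx acc pos

-- ===== VERDICT (by name: the statement is the Claim_ definition above) =====
theorem generate_p_spec : Claim_equal_generate_p := by
  intro ps v y gs _dom hpre
  unfold Spec_generate_p generate_p generate_p_alt
  dsimp only []
  by_cases hy : y ≤ 0
  · simp [PySem.List.pyRange_one_eq_nil hy]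
  rw [not_le] at hy
  rcases hpre with h0 | ⟨hv, _hN, h2⟩
  · omega
  set g : Int := (gs.length : Int) with hgdef
  set w : Int := v - g with hwdef
  set m : Nat := (y - 1).toNat with hmdef
  have hym : y = (m : Int) + 1 := by omega
  have hgv : 1 ≤ m → g ≤ v := fun hm => (h2 (by omega)).1
  -- characterize A's idxs
  have hidx : (PySem.List.pyRange 0 (y - 1) 1).foldl
      (fun idxs i => (PySem.List.enumerate gs 0).foldl
        (fun ac kg => PySem.List.insert ac ((i + 1) * v + kg.1) kg.2) idxs)
      (PySem.List.pyRange 0 (v * y - g * (y - 1)) 1)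
      = pvPref v w gs m := by
    rcases Nat.eq_zero_or_pos m with hm0 | hm1
    · rw [hm0] at hym
      have h1 : y - 1 = (0 : Int) := by omega
      have h2' : v * y - g * (y - 1) = v := by rw [hym]; ring
      rw [h2', h1, PySem.List.pyRange_one_eq_nil le_rfl, List.foldl_nil, hm0]
      simp [pvPref]
    · have hg := hgv hm1
      have h1 : y - 1 = ((m : Nat) : Int) := by omega
      have h2' : v * y - g * (y - 1) = v + (m : Int) * w := by rw [hym, hwdef]; ring
      rw [h2', h1, hwdef, hgdef]
      exact pv_idxs v gs hv (by omega) m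
  rw [hidx, pv_read_outerA]
  set chunks : List (List Int) :=
    PySem.List.pyRange 0 v 1 :: (List.range m).map (fun i => gs ++ pvSeg v w i) with hchdef
  have hflat : chunks.flatten = pvPref v w gs m := by
    rw [hchdef, pvPref, List.flatten_cons]
    congr 1
  have hchlen : ∀ c ∈ chunks, c.length = v.toNat := by
    intro c hc
    rw [hchdef] at hc
    rcases List.mem_cons.mp hc with h | h
    · rw [h, PySem.List.length_pyRange_one]; norm_num
    · obtain ⟨i, hi, rfl⟩ := List.mem_map.mp h
      have him := List.mem_range.mp hi
      have hg := hgv (by omega)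
      have hw : 0 ≤ w := by omega
      simp only [List.length_append, pvSeg, PySem.List.length_pyRange_one]
      have he : v + (i : Int) * w + w - (v + (i : Int) * w) = w := by ring
      rw [he]
      omega
  have hlen1 : (PySem.List.pyRange 0 y 1).length = m + 1 := by
    rw [PySem.List.length_pyRange_one]; omega
  have hchl : chunks.length = m + 1 := by simp [hchdef]
  have hrows : (List.range ((PySem.List.pyRange 0 y 1).length)).map (fun (r : Nat) =>
        (List.range v.toNat).map (fun (j : Nat) =>
          PySem.List.pyGetD ps (PySem.List.pyGetD (pvPref v w gs m)
            (0 + (r : Int) * v.toNat + (j : Int)) 0) 0))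
      = chunks.map (fun c => c.map (fun x => PySem.List.pyGetD ps x 0)) := by
    rw [hlen1, ← pv_chunk_rows (fun x => PySem.List.pyGetD ps x 0) v.toNat chunks hchlen, hchl]
    apply List.map_congr_left; intro r _
    apply List.map_congr_left; intro j _
    congr 1
    have hcast : (0 : Int) + (r : Int) * v.toNat + (j : Int)
        = ((r * v.toNat + j : Nat) : Int) := by push_cast; ring
    rw [← hflat, hcast, PySem.List.pyGetD_natCast]
  rw [hrows]
  -- B side
  rw [PySem.List.pyRange_one_cons hy, List.foldl_cons, if_pos rfl]
  rw [pv_b_tailA ps _ _ w (PySem.List.pyRange (0+1) y 1)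
    (fun x hx => by have := (PySem.List.mem_pyRange_one.mp hx).1; omega)]
  have hlen2 : (PySem.List.pyRange (0+1) y 1).length = m := by
    rw [PySem.List.length_pyRange_one, hmdef]; omega
  dsimp only []
  simp only [List.nil_append, hlen2]
  -- final comparison
  rw [hchdef, List.map_cons, List.map_map]
  congr 1
  apply List.map_congr_left
  intro i hi
  have him : i < m := List.mem_range.mp hi
  have hy2 : (1 : Int) < y := by omega
  have hg := hgv (by omega)
  simp only [Function.comp_apply, List.map_append, if_pos hy2]
  congr 1
  rw [pvSeg, PySem.List.pyRange_one, PySem.List.pyRange_one, List.map_map, List.map_map]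
  have he : v + (i : Int) * w + w - (v + (i : Int) * w) = w - 0 := by ring
  rw [he]
  apply List.map_congr_left
  intro k _
  simp only [Function.comp_apply]
  congr 1
  ring
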